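-- pv_equiv track=rewrite | github.com/schebachlab/PRF-Search | enhanced_harrington_search_v60_production_version_final.py | analyze_slipsite_to_tmd_distances_contingency_table
-- ===== SOURCE A (Python) =====
-- def analyze_slipsite_to_tmd_distances_contingency_table(filtered_list, tmd_data, slipsite_list, all_heptamers):
--     """
--     Analyzes the distances between slippery sequences and their nearest upstream TMDs.
--
--     Parameters:
--         filtered_list (list): List of labeled transcripts with sequences and canonical/non-canonical labels.
--         tmd_data (dict): Dictionary containing TMD positions for each transcript.
--         slipsite_list (list): List of known slippery sequences.
--         outname (str): Base output name for files.
--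
--     Returns:
--         dict: A dictionary containing categorized distances.
--     """
--
--     non_slippery_heptamers = []
--     for heptamer in all_heptamers:
--         if heptamer not in slipsite_list:
--             non_slippery_heptamers.append(heptamer)
--
--     counts = {
--         'slippery_ideal': 0,          # A
--         'non_slippery_ideal': 0,      # B
--         'slippery_other': 0,          # C
--         'non_slippery_other': 0       # D
--     }
--
--     for transcript_data in filtered_list:
--         ensembl_transcript_id = transcript_data[1]  # Assuming transcript ID is at index 1
--         sequence_raw = transcript_data[5]  # Assuming sequence is at index 5
--         canonical_status = transcript_data[-1]  # Label is now at the last index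
--
--         # Clean sequence and convert to codons
--         sequence = ''.join(filter(str.isalpha, sequence_raw)).upper()
--         codons = [sequence[i:i+3] for i in range(0, len(sequence)-2, 3)]
--
--         # Skip if transcript has no TMD data
--         if ensembl_transcript_id not in tmd_data:
--             continue
--
--         # Get TMD positions for this transcript
--         tmd_positions = []
--         for tmd in tmd_data[ensembl_transcript_id]:
--             tm_start = tmd['adjusted_tmd_start_position'] - 1
--             tm_end = tmd['adjusted_tmd_end_position'] - 1
--             tmd_positions.append((tm_start, tm_end))
--
--         # Iterate over codon positions to find slippery sequences
--         for i in range(len(codons) - 2):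
--             heptamer_long = ''.join(codons[i:i+3])
--             heptamer = heptamer_long[2:]  # Extract the heptamer
--
--             heptamer_slippery = heptamer in slipsite_list
--             heptamer_position = i  # Position of the slippery sequence start codon
--
--             # Find all upstream TMDs
--             upstream_tmds = [tm for tm in tmd_positions if tm[1] < heptamer_position]
--
--             if not upstream_tmds:
--                 continue  # No upstream TMDs; skip this slippery sequence
--
--             # Calculate distances to all upstream TMDs and select the minimum (nearest)
--             distances_to_tmds = [heptamer_position - tm[1] for tm in upstream_tmds]
--             distance_from_harrington_ideality = [tmd_ss_distance - 45 for tmd_ss_distance in distances_to_tmds]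
--             distance_from_motif_ideality_upstream_only = [gap_ideality for gap_ideality in distance_from_harrington_ideality if gap_ideality > -45] # Could use -25 to allow a full TMD between slip site and next upstream TMD, or could use -45
--             abs_distance_from_harrington_ideality = [abs(distance) for distance in distance_from_motif_ideality_upstream_only]
--             min_distance_idx = abs_distance_from_harrington_ideality.index(min(abs_distance_from_harrington_ideality))
--             min_distance = distance_from_motif_ideality_upstream_only[min_distance_idx]
--
--
--             if min_distance == 0:
--                 if heptamer_slippery:
--                     counts['slippery_ideal'] += 1  # A
--                 else:
--                     counts['non_slippery_ideal'] += 1  # B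
--             else:
--                 if heptamer_slippery:
--                     counts['slippery_other'] += 1  # C
--                 else:
--                     counts['non_slippery_other'] += 1  # D
--
--     return counts
-- ===== SOURCE B (Python) =====
-- def analyze_slipsite_to_tmd_distances_contingency_table(filtered_list, tmd_data, slipsite_list, all_heptamers):
--     # Single pass per transcript: precompute the minimum TMD end and the set of TMD
--     # ends; position i has an upstream TMD iff min_end < i, and its nearest upstream
--     # TMD sits at the ideal 45-codon distance iff (i - 45) is one of the ends.
--     slip_set = set(slipsite_list)
--     a = b = c = d = 0
--     for row in filtered_list:
--         tid = row[1]
--         seq_raw = row[5]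
--         if tid not in tmd_data:
--             continue
--         seq = ''.join(ch for ch in seq_raw if ch.isalpha()).upper()
--         ends = [tmd['adjusted_tmd_end_position'] - 1 for tmd in tmd_data[tid]]
--         if not ends:
--             continue
--         min_end = min(ends)
--         end_set = set(ends)
--         for i in range(len(seq) // 3 - 2):
--             if i <= min_end:
--                 continue
--             heptamer = seq[3 * i + 2: 3 * i + 9]
--             if (i - 45) in end_set:
--                 if heptamer in slip_set:
--                     a += 1
--                 else:
--                     b += 1
--             else:
--                 if heptamer in slip_set:
--                     c += 1
--                 else:
--                     d += 1
--     return {'slippery_ideal': a, 'non_slippery_ideal': b,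
--             'slippery_other': c, 'non_slippery_other': d}
-- ===== Notes on version B (the rewrite author's own statement) =====
-- stated objective: simpler
-- what changed: Per transcript B precomputes the minimum TMD end and the set of TMD ends once, then classifies each codon position by two O(1) set/threshold tests, replacing A's per-position pipeline (codon list, filter of upstream TMDs, two mapped lists, a filtered list, an abs list, min and index scan).
import Mathlib
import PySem

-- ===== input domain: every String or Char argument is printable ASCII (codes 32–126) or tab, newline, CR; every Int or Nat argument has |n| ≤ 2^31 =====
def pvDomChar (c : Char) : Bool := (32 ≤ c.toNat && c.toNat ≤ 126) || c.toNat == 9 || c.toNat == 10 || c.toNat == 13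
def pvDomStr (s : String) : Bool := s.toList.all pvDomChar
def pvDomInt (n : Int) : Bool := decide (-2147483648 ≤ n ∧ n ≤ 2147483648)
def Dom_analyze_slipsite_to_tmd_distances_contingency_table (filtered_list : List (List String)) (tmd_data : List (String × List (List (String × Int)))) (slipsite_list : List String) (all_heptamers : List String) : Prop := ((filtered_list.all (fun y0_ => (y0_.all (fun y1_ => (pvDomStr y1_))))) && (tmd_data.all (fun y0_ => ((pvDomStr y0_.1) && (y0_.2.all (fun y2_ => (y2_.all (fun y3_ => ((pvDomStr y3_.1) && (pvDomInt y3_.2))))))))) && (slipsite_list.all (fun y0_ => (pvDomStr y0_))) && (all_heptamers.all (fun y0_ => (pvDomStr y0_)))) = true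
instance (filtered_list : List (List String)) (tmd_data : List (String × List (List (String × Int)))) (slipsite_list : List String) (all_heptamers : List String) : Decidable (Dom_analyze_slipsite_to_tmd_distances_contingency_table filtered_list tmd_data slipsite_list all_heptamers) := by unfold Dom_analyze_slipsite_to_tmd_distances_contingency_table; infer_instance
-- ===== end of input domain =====

-- B replaces A's per-position scan over all TMD pairs (filter upstream, two mapped
-- lists, a filtered list, an abs list, min + index) by a per-transcript precomputed
-- minimum TMD end and set of TMD ends; objective: simpler (and it drops the inner
-- per-position list pipeline).

-- ===== PORT A =====
-- Python dict lookup on an association list: first match.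
def pvFind {β : Type} (d : List (String × β)) (k : String) : Option β :=
  (d.find? (fun p => p.1 == k)).map Prod.snd

-- body of A's 'for transcript_data in filtered_list' loop
def pvA_row (slipsite_list : List String) (tmd_data : List (String × List (List (String × Int))))
    (counts : PySem.Dict String Int) (transcript_data : List String) : PySem.Dict String Int :=
  let ensembl_transcript_id := PySem.List.pyGetD transcript_data 1 ""
  let sequence_raw := PySem.List.pyGetD transcript_data 5 ""
  let _canonical_status := PySem.List.pyGetD transcript_data (-1) ""
  -- sequence = ''.join(filter(str.isalpha, sequence_raw)).upper()   (kept as List Char)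
  let sequence : List Char := PySem.Chars.upper (List.filter PySem.Chars.isalpha sequence_raw.toList)
  -- codons = [sequence[i:i+3] for i in range(0, len(sequence)-2, 3)]
  let codons : List (List Char) :=
    (PySem.List.pyRange 0 ((sequence.length : Int) - 2) 3).map
      (fun i => PySem.List.slice sequence (some i) (some (i + 3)))
  match pvFind tmd_data ensembl_transcript_id with
  | none => counts          -- 'if ensembl_transcript_id not in tmd_data: continue'
  | some tmdlist =>
    let tmd_positions : List (Int × Int) :=
      tmdlist.foldl (fun acc tmd =>
        let tm_start := (pvFind tmd "adjusted_tmd_start_position").getD 0 - 1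
        let tm_end := (pvFind tmd "adjusted_tmd_end_position").getD 0 - 1
        acc ++ [(tm_start, tm_end)]) []
    (PySem.List.pyRange 0 ((codons.length : Int) - 2) 1).foldl (fun counts i =>
      let heptamer_long := PySem.Chars.join [] (PySem.List.slice codons (some i) (some (i + 3)))
      let heptamer := PySem.List.slice heptamer_long (some 2) none
      let heptamer_slippery := slipsite_list.contains (String.ofList heptamer)
      let heptamer_position := i
      let upstream_tmds := tmd_positions.filter (fun tm => decide (tm.2 < heptamer_position))
      if upstream_tmds = [] then counts
      else
        let distances_to_tmds := upstream_tmds.map (fun tm => heptamer_position - tm.2)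
        let distance_from_harrington_ideality := distances_to_tmds.map (fun d => d - 45)
        let distance_from_motif_ideality_upstream_only :=
          distance_from_harrington_ideality.filter (fun g => decide (-45 < g))
        let abs_distance_from_harrington_ideality :=
          distance_from_motif_ideality_upstream_only.map (fun d => |d|)
        let min_distance_idx :=
          (PySem.List.index? abs_distance_from_harrington_ideality
            ((PySem.List.min? abs_distance_from_harrington_ideality (fun x => x)).getD 0)).getD 0
        let min_distance : Int := distance_from_motif_ideality_upstream_only.getD min_distance_idx 0
        if min_distance = 0 then
          if heptamer_slippery then PySem.Dict.modify counts "slippery_ideal" 0 (· + 1)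
          else PySem.Dict.modify counts "non_slippery_ideal" 0 (· + 1)
        else
          if heptamer_slippery then PySem.Dict.modify counts "slippery_other" 0 (· + 1)
          else PySem.Dict.modify counts "non_slippery_other" 0 (· + 1)) counts

def analyze_slipsite_to_tmd_distances_contingency_table (filtered_list : List (List String)) (tmd_data : List (String × List (List (String × Int)))) (slipsite_list : List String) (all_heptamers : List String) : List (String × Int) :=
  let _non_slippery_heptamers : List String :=
    all_heptamers.foldl (fun acc heptamer =>
      if ¬ slipsite_list.contains heptamer then acc ++ [heptamer] else acc) []
  let counts : PySem.Dict String Int :=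
    PySem.Dict.ofList [("slippery_ideal", 0), ("non_slippery_ideal", 0),
                       ("slippery_other", 0), ("non_slippery_other", 0)]
  let counts := filtered_list.foldl (pvA_row slipsite_list tmd_data) counts
  counts.items

-- ===== PORT B =====
-- body of B's 'for row in filtered_list' loop; state = the four counters (a, b, c, d)
def pvB_row (slip_set : PySem.Set String) (tmd_data : List (String × List (List (String × Int))))
    (st : Int × Int × Int × Int) (row : List String) : Int × Int × Int × Int :=
  let tid := PySem.List.pyGetD row 1 ""
  let seq_raw := PySem.List.pyGetD row 5 ""
  match pvFind tmd_data tid with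
  | none => st
  | some tmds =>
    let seq : List Char := PySem.Chars.upper (List.filter PySem.Chars.isalpha seq_raw.toList)
    let ends := tmds.map (fun tmd => (pvFind tmd "adjusted_tmd_end_position").getD 0 - 1)
    if ends = [] then st
    else
      let min_end := (PySem.List.min? ends (fun x => x)).getD 0
      let end_set := PySem.Set.ofList ends
      (PySem.List.pyRange 0 (PySem.Int.floordiv (seq.length : Int) 3 - 2) 1).foldl (fun st i =>
        if i ≤ min_end then st
        else
          let heptamer := PySem.List.slice seq (some (3 * i + 2)) (some (3 * i + 9))
          if end_set.contains (i - 45) then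
            if slip_set.contains (String.ofList heptamer) then (st.1 + 1, st.2.1, st.2.2.1, st.2.2.2)
            else (st.1, st.2.1 + 1, st.2.2.1, st.2.2.2)
          else
            if slip_set.contains (String.ofList heptamer) then (st.1, st.2.1, st.2.2.1 + 1, st.2.2.2)
            else (st.1, st.2.1, st.2.2.1, st.2.2.2 + 1)) st

def analyze_slipsite_to_tmd_distances_contingency_table_alt (filtered_list : List (List String)) (tmd_data : List (String × List (List (String × Int)))) (slipsite_list : List String) (all_heptamers : List String) : List (String × Int) :=
  let slip_set := PySem.Set.ofList slipsite_list
  let st := filtered_list.foldl (pvB_row slip_set tmd_data) ((0, 0, 0, 0) : Int × Int × Int × Int)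
  [("slippery_ideal", st.1), ("non_slippery_ideal", st.2.1),
   ("slippery_other", st.2.2.1), ("non_slippery_other", st.2.2.2)]

-- ===== PRECONDITION & SPEC =====
-- Pre_ excludes exactly the inputs where Python A raises: a transcript row with fewer
-- than 6 fields (IndexError on row[5] / row[1] / row[-1]) or a TMD record of a listed
-- transcript missing one of the two position keys (KeyError).
def Pre_analyze_slipsite_to_tmd_distances_contingency_table (filtered_list : List (List String)) (tmd_data : List (String × List (List (String × Int)))) (slipsite_list : List String) (all_heptamers : List String) : Prop :=
  ∀ row ∈ filtered_list, 6 ≤ row.length ∧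
    ∀ tmds ∈ pvFind tmd_data (row.getD 1 ""), ∀ tmd ∈ tmds,
      (tmd.any (fun p => p.1 == "adjusted_tmd_start_position")) = true ∧
      (tmd.any (fun p => p.1 == "adjusted_tmd_end_position")) = true
instance (filtered_list : List (List String)) (tmd_data : List (String × List (List (String × Int)))) (slipsite_list : List String) (all_heptamers : List String) : Decidable (Pre_analyze_slipsite_to_tmd_distances_contingency_table filtered_list tmd_data slipsite_list all_heptamers) := by unfold Pre_analyze_slipsite_to_tmd_distances_contingency_table; infer_instance

def pvWitness_analyze_slipsite_to_tmd_distances_contingency_table : List (List String) × (List (String × List (List (String × Int)))) × List String × List String :=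
  ([["q", "t1", "q", "q", "q", "ATGGCTTTAAACGGGTATACCGGATTTCCC", "canonical"]],
   [("t1", [[("adjusted_tmd_start_position", 1), ("adjusted_tmd_end_position", 2)]])],
   ["TTTAAAC"], ["TTTAAAC", "GGGTATA"])

def Spec_analyze_slipsite_to_tmd_distances_contingency_table (filtered_list : List (List String)) (tmd_data : List (String × List (List (String × Int)))) (slipsite_list : List String) (all_heptamers : List String) (out : List (String × Int)) : Prop := out = analyze_slipsite_to_tmd_distances_contingency_table_alt filtered_list tmd_data slipsite_list all_heptamers
instance (filtered_list : List (List String)) (tmd_data : List (String × List (List (String × Int)))) (slipsite_list : List String) (all_heptamers : List String) (out : List (String × Int)) : Decidable (Spec_analyze_slipsite_to_tmd_distances_contingency_table filtered_list tmd_data slipsite_list all_heptamers out) := by unfold Spec_analyze_slipsite_to_tmd_distances_contingency_table; infer_instance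

-- ===== CLAIM (what is proved, stated in full; the proofs are below) =====
def Claim_equal_analyze_slipsite_to_tmd_distances_contingency_table : Prop := ∀ (filtered_list : List (List String)) (tmd_data : List (String × List (List (String × Int)))) (slipsite_list : List String) (all_heptamers : List String), Dom_analyze_slipsite_to_tmd_distances_contingency_table filtered_list tmd_data slipsite_list all_heptamers → Pre_analyze_slipsite_to_tmd_distances_contingency_table filtered_list tmd_data slipsite_list all_heptamers → Spec_analyze_slipsite_to_tmd_distances_contingency_table filtered_list tmd_data slipsite_list all_heptamers (analyze_slipsite_to_tmd_distances_contingency_table filtered_list tmd_data slipsite_list all_heptamers)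

-- ===== LEMMAS AND PROOFS =====

theorem pv_skip (l : List Int) (i : Int) (hne : l ≠ []) :
    l.filter (fun e => decide (e < i)) = [] ↔ i ≤ (PySem.List.min? l (fun x => x)).getD 0 := by
  cases h : PySem.List.min? l (fun x => x) with
  | none => exact absurd ((PySem.List.min?_eq_none_iff l _).mp h) hne
  | some m =>
    have hm := PySem.List.min?_mem h
    have hmin := PySem.List.min?_isMin h
    simp only [List.filter_eq_nil_iff, Option.getD_some, decide_eq_true_eq]
    constructor
    · intro H; have := H m hm; omega
    · intro H e he; have := hmin e he; omega

theorem pv_codons_len (seq : List Char) :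
    ((PySem.List.pyRange 0 ((seq.length : Int) - 2) 3).map
      (fun i => PySem.List.slice seq (some i) (some (i + 3)))).length = seq.length / 3 := by
  rw [PySem.List.pyRange_of_pos 0 ((seq.length : Int) - 2) (by norm_num)]
  simp only [List.length_map, List.length_range]
  split_ifs with h
  · have : ((seq.length : Int) - 2 - 0 + 3 - 1) / 3 = ((seq.length : Int)) / 3 := by ring_nf
    rw [this]
    have h2 : ((seq.length : Int)) / 3 = ((seq.length / 3 : Nat) : Int) := by
      exact (Int.natCast_ediv _ 3).symm
    rw [h2, Int.toNat_natCast]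
  · have : seq.length ≤ 2 := by omega
    omega

theorem pv_take3 {α : Type} (f : Nat → α) (M k : Nat) (h : k + 3 ≤ M) :
    (((List.range M).map f).drop k).take 3 = [f k, f (k+1), f (k+2)] := by
  apply List.ext_getElem
  · simp; omega
  · intro j hj1 hj2
    have hj3 : j < 3 := by simp at hj2; omega
    simp only [List.getElem_take, List.getElem_drop, List.getElem_map, List.getElem_range]
    interval_cases j <;> simp

theorem pv_codons_eq (seq : List Char) :
    ((PySem.List.pyRange 0 ((seq.length : Int) - 2) 3).map
      (fun i => PySem.List.slice seq (some i) (some (i + 3))))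
    = (List.range (seq.length / 3)).map (fun j => (seq.drop (3*j)).take 3) := by
  rw [PySem.List.pyRange_of_pos 0 ((seq.length : Int) - 2) (by norm_num), List.map_map]
  have hM : (if (0:Int) < (seq.length : Int) - 2 then (((seq.length : Int) - 2 - 0 + 3 - 1) / 3).toNat else 0) = seq.length / 3 := by
    split_ifs with h
    · have e1 : ((seq.length : Int) - 2 - 0 + 3 - 1) / 3 = ((seq.length : Int)) / 3 := by ring_nf
      rw [e1, show ((seq.length : Int))/3 = ((seq.length/3 : Nat) : Int) from by exact_mod_cast (Int.natCast_ediv seq.length 3).symm, Int.toNat_natCast]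
    · have : seq.length ≤ 2 := by omega
      omega
  rw [hM]
  apply List.map_congr_left
  intro j hj
  simp only [Function.comp_apply]
  rw [show (0 : Int) + 3 * (j:Int) = ((3*j : Nat) : Int) from by push_cast; ring]
  rw [show ((3*j : Nat) : Int) + 3 = ((3*j+3 : Nat) : Int) from by push_cast; ring]
  rw [PySem.List.slice_natCast]
  congr 1
  omega

theorem pv_heptamer (seq : List Char) (k : Nat) (hk : k + 3 ≤ seq.length / 3) :
    PySem.List.slice
      (PySem.Chars.join []
        (PySem.List.slice
          ((PySem.List.pyRange 0 ((seq.length : Int) - 2) 3).map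
            (fun i => PySem.List.slice seq (some i) (some (i + 3))))
          (some (k : Int)) (some ((k : Int) + 3))))
      (some 2) none
    = PySem.List.slice seq (some (3 * (k : Int) + 2)) (some (3 * (k : Int) + 9)) := by
  rw [pv_codons_eq]
  rw [show ((k:Int) + 3) = ((k+3 : Nat) : Int) from by push_cast; ring, PySem.List.slice_natCast]
  rw [show k + 3 - k = 3 from by omega, pv_take3 _ _ _ hk]
  have hj : PySem.Chars.join [] [(seq.drop (3*k)).take 3, (seq.drop (3*(k+1))).take 3, (seq.drop (3*(k+2))).take 3]
      = (seq.drop (3*k)).take 3 ++ ((seq.drop (3*(k+1))).take 3 ++ (seq.drop (3*(k+2))).take 3) := by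
    simp [PySem.Chars.join, List.intercalate]
  rw [hj]
  have h9 : (seq.drop (3*k)).take 3 ++ ((seq.drop (3*(k+1))).take 3 ++ (seq.drop (3*(k+2))).take 3)
      = (seq.drop (3*k)).take 9 := by
    have a1 : (seq.drop (3*k)).take 9 = (seq.drop (3*k)).take 3 ++ ((seq.drop (3*k)).drop 3).take 6 := by
      rw [← List.take_add]
    have a2 : ((seq.drop (3*k)).drop 3).take 6 = ((seq.drop (3*k)).drop 3).take 3 ++ (((seq.drop (3*k)).drop 3).drop 3).take 3 := by
      rw [← List.take_add]
    rw [a1, a2, List.drop_drop, List.drop_drop,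
      show 3*k + 3 = 3*(k+1) from by ring, show 3*(k+1) + 3 = 3*(k+2) from by ring]
  rw [h9, PySem.List.slice_from _ (by norm_num), List.drop_take, List.drop_drop]
  rw [show (3 * (k:Int) + 2) = ((3*k+2 : Nat) : Int) from by push_cast; ring]
  rw [show (3 * (k:Int) + 9) = ((3*k+9 : Nat) : Int) from by push_cast; ring, PySem.List.slice_natCast]
  congr 1
  omega

def pvU (l : List Int) (i : Int) : List Int := l.filter (fun e => decide (e < i))
def pvDM (l : List Int) (i : Int) : List Int :=
  (((pvU l i).map (fun e => i - e)).map (fun d => d - 45)).filter (fun g => decide (-45 < g))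
def pvAB (l : List Int) (i : Int) : List Int := (pvDM l i).map (fun d => |d|)

theorem pv_dm_eq (l : List Int) (i : Int) : pvDM l i = (pvU l i).map (fun e => i - e - 45) := by
  rw [pvDM, List.map_map, List.filter_eq_self.2]
  · rfl
  · intro x hx
    obtain ⟨e, he, rfl⟩ := List.mem_map.1 hx
    have : e < i := by simpa [pvU] using (List.mem_filter.1 he).2
    simp only [Function.comp_apply, decide_eq_true_eq]
    omega

theorem pv_zero_mem (l : List Int) (i : Int) : (0 ∈ pvDM l i) ↔ (i - 45) ∈ l := by
  rw [pv_dm_eq, pvU]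
  simp only [List.mem_map, List.mem_filter, decide_eq_true_eq]
  constructor
  · rintro ⟨e, ⟨hel, _⟩, he0⟩
    have he2 : e = i - 45 := by omega
    rwa [← he2]
  · intro h
    exact ⟨i - 45, ⟨h, by omega⟩, by omega⟩

theorem pv_classify (l : List Int) (i : Int) (hne : pvU l i ≠ []) :
    ((pvDM l i).getD ((PySem.List.index? (pvAB l i) ((PySem.List.min? (pvAB l i) (fun x => x)).getD 0)).getD 0) 0 = 0)
    ↔ (i - 45) ∈ l := by
  have hdmne : pvDM l i ≠ [] := by
    rw [pv_dm_eq]; simpa using hne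
  obtain ⟨m, hm⟩ : ∃ m, PySem.List.min? (pvAB l i) (fun x => x) = some m := by
    cases h : PySem.List.min? (pvAB l i) (fun x => x) with
    | none =>
      have := (PySem.List.min?_eq_none_iff (pvAB l i) _).mp h
      rw [pvAB] at this
      exact absurd (List.map_eq_nil_iff.1 this) hdmne
    | some m => exact ⟨m, rfl⟩
  have hmmem : m ∈ pvAB l i := PySem.List.min?_mem hm
  have hmin := PySem.List.min?_isMin hm
  obtain ⟨j, hj⟩ : ∃ j, PySem.List.index? (pvAB l i) m = some j := by
    cases h : PySem.List.index? (pvAB l i) m with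
    | none => exact absurd hmmem ((PySem.List.index?_eq_none_iff (pvAB l i) m).mp h)
    | some j => exact ⟨j, rfl⟩
  obtain ⟨hjlt, hjval, -⟩ := PySem.List.getElem_of_index?_eq_some hj
  have hjdm : j < (pvDM l i).length := by simpa [pvAB] using hjlt
  rw [hm]
  simp only [Option.getD_some]
  rw [hj]
  simp only [Option.getD_some]
  have hgd : (pvDM l i).getD j 0 = (pvDM l i)[j] := List.getD_eq_getElem _ _ hjdm
  rw [hgd]
  have habs : |(pvDM l i)[j]'hjdm| = m := by
    have h2 : (pvAB l i)[j]'hjlt = |(pvDM l i)[j]'hjdm| := by simp [pvAB]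
    rw [← hjval, h2]
  rw [← pv_zero_mem l i]
  constructor
  · intro h
    exact h ▸ List.getElem_mem hjdm
  · intro h
    have h0 : (0:Int) ∈ pvAB l i := by
      rw [pvAB]
      exact List.mem_map.2 ⟨0, h, by norm_num⟩
    have hle : m ≤ 0 := by simpa using hmin 0 h0
    have hnn : (0:Int) ≤ |(pvDM l i)[j]'hjdm| := abs_nonneg _
    exact abs_eq_zero.1 (by omega)

def pvDict4 (t : Int × Int × Int × Int) : PySem.Dict String Int :=
  PySem.Dict.ofList [("slippery_ideal", t.1), ("non_slippery_ideal", t.2.1),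
                     ("slippery_other", t.2.2.1), ("non_slippery_other", t.2.2.2)]

theorem pv_foldl_id {α β : Type} (r : List β) (f : α → β → α)
    (h : ∀ a, ∀ x ∈ r, f a x = a) (a : α) : r.foldl f a = a := by
  induction r generalizing a with
  | nil => rfl
  | cons x xs ih =>
    rw [List.foldl_cons, h a x (by simp)]
    exact ih (fun a y hy => h a y (by simp [hy])) a

theorem pv_fold_dt (r : List Int) (fA : PySem.Dict String Int → Int → PySem.Dict String Int)
    (fB : Int × Int × Int × Int → Int → Int × Int × Int × Int)
    (h : ∀ i ∈ r, ∀ t, fA (pvDict4 t) i = pvDict4 (fB t i)) (t : Int × Int × Int × Int) :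
    r.foldl fA (pvDict4 t) = pvDict4 (r.foldl fB t) := by
  induction r generalizing t with
  | nil => rfl
  | cons x xs ih =>
    rw [List.foldl_cons, List.foldl_cons, h x (by simp) t]
    exact ih (fun i hi t => h i (by simp [hi]) t) _

theorem pv_contains_ofList (sl : List String) (s : String) :
    (PySem.Set.ofList sl).contains s = sl.contains s := by
  rw [Bool.eq_iff_iff, PySem.Set.contains_iff, List.contains_iff_mem]
  exact PySem.Set.mem_ofList _ _

theorem pv_row_eq (sl : List String) (td : List (String × List (List (String × Int))))
    (row : List String) (t : Int × Int × Int × Int) :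
    pvA_row sl td (pvDict4 t) row = pvDict4 (pvB_row (PySem.Set.ofList sl) td t row) := by
  cases hfind : pvFind td (PySem.List.pyGetD row 1 "") with
  | none => simp only [pvA_row, pvB_row, hfind]
  | some tmds =>
    simp only [pvA_row, pvB_row, hfind]
    -- common abbreviations
    set seq : List Char := PySem.Chars.upper (List.filter PySem.Chars.isalpha (PySem.List.pyGetD row 5 "").toList) with hseq
    set pairF : List (String × Int) → Int × Int := fun tmd =>
      ((pvFind tmd "adjusted_tmd_start_position").getD 0 - 1,
       (pvFind tmd "adjusted_tmd_end_position").getD 0 - 1) with hpairF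
    have hpos : tmds.foldl (fun acc tmd =>
        acc ++ [((pvFind tmd "adjusted_tmd_start_position").getD 0 - 1,
                 (pvFind tmd "adjusted_tmd_end_position").getD 0 - 1)]) [] = tmds.map pairF := by
      simpa using PySem.List.foldl_append_singleton_eq_map pairF tmds []
    rw [hpos]
    set endF : List (String × Int) → Int := fun tmd => (pvFind tmd "adjusted_tmd_end_position").getD 0 - 1 with hendF
    set ends : List Int := tmds.map endF with hends
    have hends2 : (tmds.map pairF).map Prod.snd = ends := by
      rw [List.map_map, hends]; rfl
    rcases eq_or_ne tmds [] with rfl | htne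
    · simp only [List.map_nil, List.filter_nil]
      rw [pv_foldl_id]
      · rfl
      · intro a i _
        simp
    · have hene : ends ≠ [] := by
        simp [hends, htne]
      rw [if_neg hene]
      have hlen : ((PySem.List.pyRange 0 ((seq.length : Int) - 2) 3).map
          (fun i => PySem.List.slice seq (some i) (some (i + 3)))).length = seq.length / 3 :=
        pv_codons_len seq
      rw [hlen]
      have hfd : PySem.Int.floordiv ((seq.length : Int)) 3 = ((seq.length / 3 : Nat) : Int) := by
        rw [PySem.Int.floordiv_eq_ediv_of_pos (by norm_num)]
        exact_mod_cast (Int.natCast_ediv seq.length 3)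
      rw [hfd]
      apply pv_fold_dt
      intro i hi t
      obtain ⟨h0i, hilt⟩ := (PySem.List.mem_pyRange_one).1 hi
      obtain ⟨k, rfl⟩ : ∃ k : Nat, i = (k : Int) := ⟨i.toNat, by omega⟩
      have hk3 : k + 3 ≤ seq.length / 3 := by
        have := hilt
        omega
      -- upstream filter via pvU
      have hU : pvU ends (k : Int) = ((tmds.map pairF).filter (fun tm => decide (tm.2 < (k : Int)))).map Prod.snd := by
        rw [pvU, ← hends2, List.filter_map]
        rfl
      have hfnil : ((tmds.map pairF).filter (fun tm => decide (tm.2 < (k : Int))) = []) ↔ pvU ends (k : Int) = [] := by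
        rw [hU, List.map_eq_nil_iff]
      have hmd : List.map (fun tm => (k : Int) - tm.2) ((tmds.map pairF).filter (fun tm => decide (tm.2 < (k : Int))))
          = (pvU ends (k : Int)).map (fun e => (k : Int) - e) := by
        rw [hU, List.map_map]
        rfl
      have hdmT : List.filter (fun g => decide (-45 < g)) (List.map (fun d => d - 45)
          (List.map (fun tm => (k : Int) - tm.2) ((tmds.map pairF).filter (fun tm => decide (tm.2 < (k : Int))))))
          = pvDM ends (k : Int) := by
        rw [hmd]; rfl
      have hcontains : PySem.Set.contains (PySem.Set.ofList ends) ((k : Int) - 45) = decide (((k : Int) - 45) ∈ ends) := by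
        rw [Bool.eq_iff_iff, PySem.Set.contains_iff, decide_eq_true_eq]
        exact PySem.Set.mem_ofList _ _
      have hskip := pv_skip ends (k : Int) hene
      have hhept := pv_heptamer seq k hk3
      rw [hdmT, hhept, hcontains]
      by_cases hnil : pvU ends (k : Int) = []
      · rw [if_pos (hfnil.2 hnil), if_pos (by exact (pv_skip ends _ hene).1 hnil)]
      · have hBnot : ¬ ((k:Int) ≤ (PySem.List.min? ends fun x => x).getD 0) :=
          fun hle => hnil (hskip.2 hle)
        rw [if_neg (fun h => hnil (hfnil.1 h)), if_neg hBnot]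
        have habT : List.map (fun d : Int => |d|) (pvDM ends (k:Int)) = pvAB ends (k:Int) := rfl
        rw [habT, pv_contains_ofList]
        have hcls := pv_classify ends (k : Int) hnil
        by_cases hid : ((k : Int) - 45) ∈ ends
        · rw [if_pos (hcls.2 hid)]
          by_cases hslip : sl.contains (String.ofList (PySem.List.slice seq (some (3 * (k:Int) + 2)) (some (3 * (k:Int) + 9)))) = true
          · rw [if_pos hslip, if_pos (decide_eq_true hid), if_pos hslip]; rfl
          · rw [if_neg hslip, if_pos (decide_eq_true hid), if_neg hslip]; rfl
        · rw [if_neg (fun h => hid (hcls.1 h))]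
          have hdneg : ¬ (decide (((k:Int) - 45) ∈ ends) = true) := by simp [hid]
          by_cases hslip : sl.contains (String.ofList (PySem.List.slice seq (some (3 * (k:Int) + 2)) (some (3 * (k:Int) + 9)))) = true
          · rw [if_pos hslip, if_neg hdneg, if_pos hslip]; rfl
          · rw [if_neg hslip, if_neg hdneg, if_neg hslip]; rfl

theorem pv_fold_eq (sl : List String) (td : List (String × List (List (String × Int))))
    (rows : List (List String)) (t : Int × Int × Int × Int) :
    rows.foldl (pvA_row sl td) (pvDict4 t)
      = pvDict4 (rows.foldl (pvB_row (PySem.Set.ofList sl) td) t) := by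
  induction rows generalizing t with
  | nil => rfl
  | cons r rs ih => simp only [List.foldl_cons, pv_row_eq, ih]

-- ===== VERDICT (by name: the statement is the Claim_ definition above) =====
theorem analyze_slipsite_to_tmd_distances_contingency_table_spec : Claim_equal_analyze_slipsite_to_tmd_distances_contingency_table := by
  intro filtered_list tmd_data slipsite_list all_heptamers _ _
  show _ = _
  unfold analyze_slipsite_to_tmd_distances_contingency_table
    analyze_slipsite_to_tmd_distances_contingency_table_alt
  have h0 : (PySem.Dict.ofList [("slippery_ideal", (0:Int)), ("non_slippery_ideal", 0),
      ("slippery_other", 0), ("non_slippery_other", 0)]) = pvDict4 (0, 0, 0, 0) := rfl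
  simp only [h0, pv_fold_eq]
  rfl
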